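-- pv_equiv track=rewrite | github.com/OSINThk/COVID19_Data_Scraper | Wikipedia_Scraper/utils.py | sanitize_digit
-- ===== SOURCE A (Python) =====
-- def sanitize_digit(d):
--     try:
--         x = ''.join(c for c in d if c.isdigit())
--         if x:
--             return str(int(x))
--         else:
--             return "0"
--     except:
--         return "0"
-- ===== SOURCE B (Python) =====
-- def sanitize_digit(d):
--     # One pass: Horner accumulation of the digit characters; str(0) == "0"
--     # covers the no-digit case. Exact for ASCII digit characters.
--     acc = 0
--     for c in d:
--         if c.isdigit():
--             acc = acc * 10 + (ord(c) - 48)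
--     return str(acc)
-- ===== Notes on version B (the rewrite author's own statement) =====
-- stated objective: simpler
-- what changed: Instead of building the filtered digit string, re-parsing it with int() and re-printing it (with a try/except and an emptiness branch), B computes the integer directly in one Horner pass (acc = acc*10 + digit value) and returns str(acc), which is '0' when no digit occurs.
import Mathlib
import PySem

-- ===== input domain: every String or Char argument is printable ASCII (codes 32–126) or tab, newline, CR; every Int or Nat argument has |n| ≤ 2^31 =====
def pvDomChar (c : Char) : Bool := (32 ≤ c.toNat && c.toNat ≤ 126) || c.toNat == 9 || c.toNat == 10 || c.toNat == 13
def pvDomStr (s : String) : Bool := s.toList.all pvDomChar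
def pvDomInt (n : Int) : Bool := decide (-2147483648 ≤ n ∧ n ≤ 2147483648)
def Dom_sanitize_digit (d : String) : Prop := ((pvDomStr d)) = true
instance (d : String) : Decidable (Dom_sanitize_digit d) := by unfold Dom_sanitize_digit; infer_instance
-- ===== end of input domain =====

-- B replaces A's filter-join / int() / str() round trip by a single Horner pass
-- over the characters (objective: simpler).

-- ===== PORT A =====
-- Hand port of A's `int(x)` at this call site. PySem.Int.ofChars? is the Python-exact
-- int(), but its digit accumulation lives in a private definition with no public
-- characterisation lemma, so the conversion is ported by hand, step for step, for the
-- strings this call site can produce: x is a string consisting solely of isdigit-true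
-- characters (on the ASCII domain these are exactly '0'..'9'), where int() accepts
-- exactly the nonempty such strings and returns their decimal value; exact there.
def pvIntOfDigits? (cs : List Char) : Option Int :=
  if cs = [] then none
  else if cs.all PySem.Chars.isdigit then
    some (cs.foldl (fun a c => a * 10 + ((c.toNat : Int) - 48)) 0)
  else none

def sanitize_digit (d : String) : String :=
  -- x = ''.join(c for c in d if c.isdigit())
  let x := d.toList.filter (fun c => PySem.Chars.isdigit c)
  -- if x: return str(int(x)) else: return "0"; the bare except returns "0"
  if x = [] then "0"
  else
    match pvIntOfDigits? x with
    | some n => PySem.Int.toStr n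
    | none => "0"

-- ===== PORT B =====
def sanitize_digit_alt (d : String) : String :=
  PySem.Int.toStr
    (d.toList.foldl
      (fun acc c => if PySem.Chars.isdigit c then acc * 10 + ((c.toNat : Int) - 48) else acc) 0)

-- ===== PRECONDITION & SPEC =====
def Spec_sanitize_digit (d : String) (out : String) : Prop := out = sanitize_digit_alt d
instance (d : String) (out : String) : Decidable (Spec_sanitize_digit d out) := by unfold Spec_sanitize_digit; infer_instance

-- ===== CLAIM (what is proved, stated in full; the proofs are below) =====
def Claim_equal_sanitize_digit : Prop := ∀ (d : String), Dom_sanitize_digit d → Spec_sanitize_digit d (sanitize_digit d)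

-- ===== LEMMAS AND PROOFS =====

-- B's guarded fold over all characters is A's plain fold over the filtered characters.
theorem pv_fold_filter (cs : List Char) :
    cs.foldl
      (fun acc c => if PySem.Chars.isdigit c then acc * 10 + ((c.toNat : Int) - 48) else acc) 0
    = (cs.filter (fun c => PySem.Chars.isdigit c)).foldl
        (fun a c => a * 10 + ((c.toNat : Int) - 48)) 0 :=
  (List.foldl_filter ..).symm

-- ===== VERDICT (by name: the statement is the Claim_ definition above) =====
theorem sanitize_digit_spec : Claim_equal_sanitize_digit := by
  intro d _
  unfold Spec_sanitize_digit sanitize_digit sanitize_digit_alt pvIntOfDigits?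
  rw [pv_fold_filter]
  set x := d.toList.filter (fun c => PySem.Chars.isdigit c) with hx
  by_cases h : x = []
  · simp [h]
    decide
  · have hall : x.all PySem.Chars.isdigit = true := by
      simp [hx, List.all_eq_true]
    simp [h, hall]
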